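-- pv_equiv track=rewrite | github.com/Skengrek/Pokemon_card_generator | src/text.py | get_spaces_index
-- ===== SOURCE A (Python) =====
-- def get_spaces_index(text):
--     """
--         Get where the spaces are, account the spaces grouped as one
--     """
--     index_list = []
--     i = 0
--     last_letter = ''
--     for letter in text:
--         if letter == ' ' and last_letter != ' ':
--             index_list.append(i)
--         last_letter = letter
--         i += 1
--     return index_list
-- ===== SOURCE B (Python) =====
-- def get_spaces_index(text):
--     """
--         Get where the spaces are, account the spaces grouped as one
--     """
--     index_list = []
--     i = 0
--     n = len(text)
--     while i < n:
--         if text[i] == ' ':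
--             index_list.append(i)
--             while i < n and text[i] == ' ':
--                 i += 1
--         else:
--             i += 1
--     return index_list
-- ===== Notes on version B (the rewrite author's own statement) =====
-- stated objective: alternative
-- what changed: Replaces the per-character last_letter state machine by a run-skipping index scan: on hitting a space it records the index and jumps past the whole maximal space run, so no previous-character state is kept.
import Mathlib
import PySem

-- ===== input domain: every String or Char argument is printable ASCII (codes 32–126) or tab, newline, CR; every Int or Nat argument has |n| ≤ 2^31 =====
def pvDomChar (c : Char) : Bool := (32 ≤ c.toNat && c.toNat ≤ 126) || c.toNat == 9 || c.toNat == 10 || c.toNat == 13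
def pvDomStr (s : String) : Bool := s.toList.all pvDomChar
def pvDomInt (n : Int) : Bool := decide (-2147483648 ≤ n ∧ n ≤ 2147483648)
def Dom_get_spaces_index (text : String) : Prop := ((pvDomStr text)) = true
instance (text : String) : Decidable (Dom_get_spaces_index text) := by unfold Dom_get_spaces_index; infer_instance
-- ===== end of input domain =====

-- B replaces A's per-character last_letter state machine by a run-skipping scan
-- (record the index of a space, then jump past the whole maximal space run); alternative, same cost.

-- ===== PORT A =====
-- last_letter starts as '' and is then always a 1-char string: modelled as Option Char (none = '')
def goA : List Char → List Int → Int → Option Char → List Int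
  | [], acc, _, _ => acc
  | c :: cs, acc, i, last =>
      goA cs (if c = ' ' ∧ last ≠ some ' ' then acc ++ [i] else acc) (i + 1) (some c)

def get_spaces_index (text : String) : List Int :=
  goA text.toList [] 0 none

-- ===== PORT B =====
-- the inner 'while i < n and text[i] == " "' loop: skip the space run, tracking the index
def skipSpaces : List Char → Int → List Char × Int
  | [], i => ([], i)
  | c :: cs, i => if c = ' ' then skipSpaces cs (i + 1) else (c :: cs, i)

theorem skipSpaces_len_le (cs : List Char) : ∀ i : Int, (skipSpaces cs i).1.length ≤ cs.length := by
  induction cs with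
  | nil => intro i; simp [skipSpaces]
  | cons c cs ih =>
      intro i
      simp only [skipSpaces]
      by_cases h : c = ' '
      · simp only [h, if_pos]
        exact Nat.le_succ_of_le (ih (i + 1))
      · simp [h]

-- the outer while loop of Source B
def goB : List Char → Int → List Int
  | [], _ => []
  | c :: cs, i =>
      if c = ' ' then i :: goB (skipSpaces cs (i + 1)).1 (skipSpaces cs (i + 1)).2
      else goB cs (i + 1)
termination_by cs _ => cs.length
decreasing_by
  · exact Nat.lt_succ_of_le (skipSpaces_len_le cs (i + 1))
  · simp

def get_spaces_index_alt (text : String) : List Int :=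
  goB text.toList 0

-- ===== PRECONDITION & SPEC =====
def Spec_get_spaces_index (text : String) (out : List Int) : Prop := out = get_spaces_index_alt text
instance (text : String) (out : List Int) : Decidable (Spec_get_spaces_index text out) := by unfold Spec_get_spaces_index; infer_instance

-- ===== CLAIM (what is proved, stated in full; the proofs are below) =====
def Claim_equal_get_spaces_index : Prop := ∀ (text : String), Dom_get_spaces_index text → Spec_get_spaces_index text (get_spaces_index text)

-- ===== LEMMAS AND PROOFS =====

-- A's emitted indices when scanning cs with previous character prev and next index k
def pairScan (prev : Char) (k : Int) : List Char → List Int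
  | [] => []
  | c :: cs => (if c = ' ' ∧ prev ≠ ' ' then [k] else []) ++ pairScan c (k + 1) cs

theorem goA_some (cs : List Char) : ∀ (acc : List Int) (k : Int) (prev : Char),
    goA cs acc k (some prev) = acc ++ pairScan prev k cs := by
  induction cs with
  | nil => intro acc k prev; simp [goA, pairScan]
  | cons c cs ih =>
      intro acc k prev
      simp only [goA, pairScan, ih]
      by_cases h : c = ' ' ∧ prev ≠ ' '
      · simp [h]
      · simp [h]

theorem pairScan_eq_goB (cs : List Char) : ∀ k : Int,
    (∀ prev, prev ≠ ' ' → pairScan prev k cs = goB cs k) ∧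
      (pairScan ' ' k cs = goB (skipSpaces cs k).1 (skipSpaces cs k).2) := by
  induction cs with
  | nil => intro k; simp [pairScan, goB, skipSpaces]
  | cons c cs ih =>
      intro k
      constructor
      · intro prev hprev
        by_cases hc : c = ' '
        · subst hc
          simp [pairScan, goB, hprev, (ih (k + 1)).2]
        · simp [pairScan, goB, hc, (ih (k + 1)).1 c hc]
      · by_cases hc : c = ' '
        · subst hc
          simp [pairScan, skipSpaces, (ih (k + 1)).2]
        · simp [pairScan, skipSpaces, goB, hc, (ih (k + 1)).1 c hc]

-- ===== VERDICT (by name: the statement is the Claim_ definition above) =====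
theorem get_spaces_index_spec : Claim_equal_get_spaces_index := by
  intro text _
  unfold Spec_get_spaces_index get_spaces_index get_spaces_index_alt
  cases h : text.toList with
  | nil => simp [goA, goB]
  | cons c cs =>
      by_cases hc : c = ' '
      · subst hc
        simp [goA, goB, goA_some]
        exact (pairScan_eq_goB cs 1).2
      · simp [goA, goB, hc, goA_some]
        exact (pairScan_eq_goB cs 1).1 c hc
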